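-- pv_equiv track=rewrite | github.com/jsantos0511-dot/gerador-de-loteria | main.py | aplicar_filtros
-- ===== SOURCE A (Python) =====
-- def aplicar_filtros(combos, f_seq, f_fin, f_par, max_p, dez_jogo, limite, tudo):
--     res = []
--     for c in combos:
--         j = list(c)
--         if f_seq and any(j[i+1] == j[i]+1 for i in range(len(j)-1)): continue
--         if f_fin and any([n % 10 for n in j].count(f) > 4 for f in [n % 10 for n in j]): continue
--         if f_par:
--             p = len([n for n in j if n % 2 == 0])
--             if p > max_p or (dez_jogo - p) > max_p: continue
--         res.append(j)
--         if not tudo and len(res) >= limite: break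
--     return res
-- ===== SOURCE B (Python) =====
-- def aplicar_filtros(combos, f_seq, f_fin, f_par, max_p, dez_jogo, limite, tudo):
--     survivors = [list(c) for c in combos]
--     if f_seq:
--         survivors = [j for j in survivors
--                      if not any(b == a + 1 for a, b in zip(j, j[1:]))]
--     if f_fin:
--         survivors = [j for j in survivors if _sem_final_repetido(j)]
--     if f_par:
--         survivors = [j for j in survivors if _paridade_ok(j, max_p, dez_jogo)]
--     if tudo:
--         return survivors
--     return survivors[:limite] if limite > 0 else []
--
--
-- def _sem_final_repetido(j):
--     counts = {}
--     for n in j: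
--         f = n % 10
--         counts[f] = counts.get(f, 0) + 1
--     return all(v <= 4 for v in counts.values())
--
--
-- def _paridade_ok(j, max_p, dez_jogo):
--     p = sum(1 for n in j if n % 2 == 0)
--     return p <= max_p and dez_jogo - p <= max_p
-- ===== Notes on version B (the rewrite author's own statement) =====
-- stated objective: simpler
-- what changed: A's single short-circuiting loop with three continue-tests and an in-loop break is replaced by three successive filter passes (the ending rule via a counter dict built once instead of repeated list.count scans) followed by one final truncation of the survivor list.
-- intended difference: When tudo is false and limite <= 0 but some combo passes all enabled filters, A's post-append break still returns that first surviving combo, while B returns the requested number of results, namely []; B's is the intended reading of limite <= 0. — e.g. on aplicar_filtros([[2]], false, false, false, 0, 0, 0, false): A returns [[2]], B returns []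
import Mathlib
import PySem

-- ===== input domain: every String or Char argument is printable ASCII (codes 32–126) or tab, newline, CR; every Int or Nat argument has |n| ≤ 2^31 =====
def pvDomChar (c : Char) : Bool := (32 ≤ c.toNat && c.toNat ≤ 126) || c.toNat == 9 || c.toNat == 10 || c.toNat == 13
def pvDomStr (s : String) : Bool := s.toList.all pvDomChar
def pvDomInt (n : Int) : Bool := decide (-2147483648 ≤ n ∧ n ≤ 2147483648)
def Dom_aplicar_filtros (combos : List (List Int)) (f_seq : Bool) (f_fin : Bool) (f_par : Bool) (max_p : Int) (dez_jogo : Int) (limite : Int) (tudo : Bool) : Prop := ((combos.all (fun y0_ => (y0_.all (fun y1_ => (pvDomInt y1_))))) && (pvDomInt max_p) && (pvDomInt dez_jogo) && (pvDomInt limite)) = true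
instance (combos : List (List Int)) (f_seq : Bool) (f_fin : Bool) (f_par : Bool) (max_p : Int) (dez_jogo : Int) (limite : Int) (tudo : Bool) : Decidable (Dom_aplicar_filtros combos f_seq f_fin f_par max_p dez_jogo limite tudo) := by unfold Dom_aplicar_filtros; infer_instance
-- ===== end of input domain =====

-- B replaces A's single short-circuiting loop by three successive filter passes plus a final
-- truncation (objective: simpler decomposition); B intentionally returns [] when limite <= 0
-- and tudo is false, where A's post-append break returns one surviving combo.

-- ===== PORT A =====
-- any(j[i+1] == j[i]+1 for i in range(len(j)-1)); indices i, i+1 are always in range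
def pvSeqA (j : List Int) : Bool :=
  (PySem.List.pyRange 0 ((j.length : Int) - 1) 1).any (fun i =>
    PySem.List.pyGetD j (i + 1) 0 == PySem.List.pyGetD j i 0 + 1)

-- any([n % 10 for n in j].count(f) > 4 for f in [n % 10 for n in j])
def pvFinA (j : List Int) : Bool :=
  (j.map (fun n => PySem.Int.mod n 10)).any (fun f =>
    decide (4 < PySem.List.count (j.map (fun n => PySem.Int.mod n 10)) f))

-- p = len([n for n in j if n % 2 == 0]); p > max_p or (dez_jogo - p) > max_p
def pvParRejA (j : List Int) (max_p dez_jogo : Int) : Bool :=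
  let p : Int := ((j.filter (fun n => PySem.Int.mod n 2 == 0)).length : Int)
  decide (max_p < p) || decide (max_p < dez_jogo - p)

def aplicarA_go (f_seq f_fin f_par : Bool) (max_p dez_jogo limite : Int) (tudo : Bool) :
    List (List Int) → List (List Int) → List (List Int)
  | [], res => res
  | c :: rest, res =>
    if f_seq && pvSeqA c then aplicarA_go f_seq f_fin f_par max_p dez_jogo limite tudo rest res
    else if f_fin && pvFinA c then aplicarA_go f_seq f_fin f_par max_p dez_jogo limite tudo rest res
    else if f_par && pvParRejA c max_p dez_jogo then aplicarA_go f_seq f_fin f_par max_p dez_jogo limite tudo rest res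
    else
      let res' := res ++ [c]
      if !tudo && decide (limite ≤ (res'.length : Int)) then res'
      else aplicarA_go f_seq f_fin f_par max_p dez_jogo limite tudo rest res'

def aplicar_filtros (combos : List (List Int)) (f_seq : Bool) (f_fin : Bool) (f_par : Bool) (max_p : Int) (dez_jogo : Int) (limite : Int) (tudo : Bool) : List (List Int) :=
  aplicarA_go f_seq f_fin f_par max_p dez_jogo limite tudo combos []

-- ===== PORT B =====
-- not any(b == a + 1 for a, b in zip(j, j[1:]))
def pvNoSeqB (j : List Int) : Bool :=
  !((j.zip (PySem.List.slice j (some 1) none)).any (fun ab => ab.2 == ab.1 + 1))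

-- counter over the last digits, then all counts <= 4
def pvFinB (j : List Int) : Bool :=
  let counts := j.foldl
    (fun (d : PySem.Dict Int Int) n => d.modify (PySem.Int.mod n 10) 0 (· + 1))
    PySem.Dict.empty
  counts.values.all (fun v => decide (v ≤ 4))

-- p = sum(1 for n in j if n % 2 == 0); p <= max_p and dez_jogo - p <= max_p
def pvParB (j : List Int) (max_p dez_jogo : Int) : Bool :=
  let p : Int := j.foldl (fun acc n => if PySem.Int.mod n 2 == 0 then acc + 1 else acc) 0
  decide (p ≤ max_p) && decide (dez_jogo - p ≤ max_p)

def aplicar_filtros_alt (combos : List (List Int)) (f_seq : Bool) (f_fin : Bool) (f_par : Bool) (max_p : Int) (dez_jogo : Int) (limite : Int) (tudo : Bool) : List (List Int) :=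
  let s0 := combos.map (fun c => c)
  let s1 := if f_seq then s0.filter pvNoSeqB else s0
  let s2 := if f_fin then s1.filter pvFinB else s1
  let s3 := if f_par then s2.filter (fun j => pvParB j max_p dez_jogo) else s2
  if tudo then s3
  else if limite > 0 then PySem.List.slice s3 none (some limite) else []

-- ===== PRECONDITION & SPEC =====
-- When tudo is false and limite <= 0 but some combo passes all enabled filters, A's
-- post-append break still returns that first surviving combo, while B returns the
-- requested number of results, namely []; B's is the intended reading of limite <= 0.
def D_aplicar_filtros (combos : List (List Int)) (f_seq : Bool) (f_fin : Bool) (f_par : Bool) (max_p : Int) (dez_jogo : Int) (limite : Int) (tudo : Bool) : Prop :=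
  tudo = false ∧ limite ≤ 0 ∧ ∃ j ∈ combos,
    (f_seq → j.IsChain (fun a b => a + 1 ≠ b)) ∧
    (f_fin → ∀ n ∈ j, j.countP (fun m => m % 10 == n % 10) ≤ 4) ∧
    (f_par → (j.countP (fun n => n % 2 == 0) : Int) ≤ max_p ∧
             dez_jogo - (j.countP (fun n => n % 2 == 0) : Int) ≤ max_p)
instance (combos : List (List Int)) (f_seq : Bool) (f_fin : Bool) (f_par : Bool) (max_p : Int) (dez_jogo : Int) (limite : Int) (tudo : Bool) : Decidable (D_aplicar_filtros combos f_seq f_fin f_par max_p dez_jogo limite tudo) := by unfold D_aplicar_filtros; infer_instance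

def Spec_aplicar_filtros (combos : List (List Int)) (f_seq : Bool) (f_fin : Bool) (f_par : Bool) (max_p : Int) (dez_jogo : Int) (limite : Int) (tudo : Bool) (out : List (List Int)) : Prop := ¬ D_aplicar_filtros combos f_seq f_fin f_par max_p dez_jogo limite tudo → out = aplicar_filtros_alt combos f_seq f_fin f_par max_p dez_jogo limite tudo
instance (combos : List (List Int)) (f_seq : Bool) (f_fin : Bool) (f_par : Bool) (max_p : Int) (dez_jogo : Int) (limite : Int) (tudo : Bool) (out : List (List Int)) : Decidable (Spec_aplicar_filtros combos f_seq f_fin f_par max_p dez_jogo limite tudo out) := by unfold Spec_aplicar_filtros; infer_instance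

def pvDiffWitness_aplicar_filtros : List (List Int) × Bool × Bool × Bool × Int × Int × Int × Bool :=
  ([[2]], false, false, false, 0, 0, 0, false)
def pvDiffWitnessOut_aplicar_filtros : (List (List Int)) × (List (List Int)) := ([[2]], [])

-- ===== CLAIM (what is proved, stated in full; the proofs are below) =====
def Claim_unchanged_aplicar_filtros : Prop := ∀ (combos : List (List Int)) (f_seq : Bool) (f_fin : Bool) (f_par : Bool) (max_p : Int) (dez_jogo : Int) (limite : Int) (tudo : Bool), Dom_aplicar_filtros combos f_seq f_fin f_par max_p dez_jogo limite tudo → Spec_aplicar_filtros combos f_seq f_fin f_par max_p dez_jogo limite tudo (aplicar_filtros combos f_seq f_fin f_par max_p dez_jogo limite tudo)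
def Claim_changed_aplicar_filtros : Prop := Dom_aplicar_filtros (pvDiffWitness_aplicar_filtros.1) (pvDiffWitness_aplicar_filtros.2.1) (pvDiffWitness_aplicar_filtros.2.2.1) (pvDiffWitness_aplicar_filtros.2.2.2.1) (pvDiffWitness_aplicar_filtros.2.2.2.2.1) (pvDiffWitness_aplicar_filtros.2.2.2.2.2.1) (pvDiffWitness_aplicar_filtros.2.2.2.2.2.2.1) (pvDiffWitness_aplicar_filtros.2.2.2.2.2.2.2) ∧ D_aplicar_filtros (pvDiffWitness_aplicar_filtros.1) (pvDiffWitness_aplicar_filtros.2.1) (pvDiffWitness_aplicar_filtros.2.2.1) (pvDiffWitness_aplicar_filtros.2.2.2.1) (pvDiffWitness_aplicar_filtros.2.2.2.2.1) (pvDiffWitness_aplicar_filtros.2.2.2.2.2.1) (pvDiffWitness_aplicar_filtros.2.2.2.2.2.2.1) (pvDiffWitness_aplicar_filtros.2.2.2.2.2.2.2) ∧ aplicar_filtros (pvDiffWitness_aplicar_filtros.1) (pvDiffWitness_aplicar_filtros.2.1) (pvDiffWitness_aplicar_filtros.2.2.1) (pvDiffWitness_aplicar_filtros.2.2.2.1)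 (pvDiffWitness_aplicar_filtros.2.2.2.2.1) (pvDiffWitness_aplicar_filtros.2.2.2.2.2.1) (pvDiffWitness_aplicar_filtros.2.2.2.2.2.2.1) (pvDiffWitness_aplicar_filtros.2.2.2.2.2.2.2) = pvDiffWitnessOut_aplicar_filtros.1 ∧ aplicar_filtros_alt (pvDiffWitness_aplicar_filtros.1) (pvDiffWitness_aplicar_filtros.2.1) (pvDiffWitness_aplicar_filtros.2.2.1) (pvDiffWitness_aplicar_filtros.2.2.2.1) (pvDiffWitness_aplicar_filtros.2.2.2.2.1) (pvDiffWitness_aplicar_filtros.2.2.2.2.2.1) (pvDiffWitness_aplicar_filtros.2.2.2.2.2.2.1) (pvDiffWitness_aplicar_filtros.2.2.2.2.2.2.2) = pvDiffWitnessOut_aplicar_filtros.2 ∧ pvDiffWitnessOut_aplicar_filtros.1 ≠ pvDiffWitnessOut_aplicar_filtros.2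
def Claim_exact_aplicar_filtros : Prop := ∀ (combos : List (List Int)) (f_seq : Bool) (f_fin : Bool) (f_par : Bool) (max_p : Int) (dez_jogo : Int) (limite : Int) (tudo : Bool), Dom_aplicar_filtros combos f_seq f_fin f_par max_p dez_jogo limite tudo → D_aplicar_filtros combos f_seq f_fin f_par max_p dez_jogo limite tudo → aplicar_filtros combos f_seq f_fin f_par max_p dez_jogo limite tudo ≠ aplicar_filtros_alt combos f_seq f_fin f_par max_p dez_jogo limite tudo

-- ===== LEMMAS AND PROOFS =====

-- A's per-combo keep test (all three continue-conditions fail)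
def pvKeepA (f_seq f_fin f_par : Bool) (max_p dez_jogo : Int) (j : List Int) : Bool :=
  !(f_seq && pvSeqA j) && !(f_fin && pvFinA j) && !(f_par && pvParRejA j max_p dez_jogo)

-- adjacent-successor test, structural form
def pvAdj : List Int → Bool
  | a :: b :: t => (b == a + 1) || pvAdj (b :: t)
  | _ => false

-- proof-side abbreviation for the survival condition inside D_
def pvLivre (f_seq f_fin f_par : Bool) (max_p dez_jogo : Int) (j : List Int) : Prop :=
  (f_seq → j.IsChain (fun a b => a + 1 ≠ b)) ∧
  (f_fin → ∀ n ∈ j, j.countP (fun m => m % 10 == n % 10) ≤ 4) ∧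
  (f_par → (j.countP (fun n => n % 2 == 0) : Int) ≤ max_p ∧
           dez_jogo - (j.countP (fun n => n % 2 == 0) : Int) ≤ max_p)

lemma pymod (n d : Int) : PySem.Int.mod n d = Int.fmod n d := rfl

lemma pymod_pos (n d : Int) (hd : 0 < d) : PySem.Int.mod n d = n % d := by
  rw [pymod, Int.fmod_eq_emod]
  simp [Int.emod_emod_of_dvd, hd.le]

lemma cnt10 (j : List Int) (n : Int) :
    (j.filter (fun m => PySem.Int.mod m 10 == PySem.Int.mod n 10)).length =
      j.countP (fun m => m % 10 == n % 10) := by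
  rw [List.countP_eq_length_filter]
  congr 1
  apply List.filter_congr
  intro m _
  rw [pymod_pos m 10 (by norm_num), pymod_pos n 10 (by norm_num)]

lemma cnt2 (j : List Int) :
    (j.filter (fun n => PySem.Int.mod n 2 == 0)).length =
      j.countP (fun n => n % 2 == 0) := by
  rw [List.countP_eq_length_filter]
  congr 1
  apply List.filter_congr
  intro m _
  rw [pymod_pos m 2 (by norm_num)]

lemma seqA_eq_range (j : List Int) :
    pvSeqA j = (List.range (j.length - 1)).any
      (fun k => j.getD (k + 1) 0 == j.getD k 0 + 1) := by
  unfold pvSeqA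
  rw [PySem.List.pyRange_one]
  have hn : (((j.length : Int)) - 1 - 0).toNat = j.length - 1 := by omega
  rw [hn, List.any_map]
  congr 1
  funext k
  show (PySem.List.pyGetD j (0 + (k : Int) + 1) 0 == PySem.List.pyGetD j (0 + (k : Int)) 0 + 1) = _
  rw [show ((0 : Int) + (k : Int) + 1) = ((k + 1 : Nat) : Int) by push_cast; ring,
      show ((0 : Int) + (k : Int)) = ((k : Nat) : Int) by ring,
      PySem.List.pyGetD_natCast, PySem.List.pyGetD_natCast]

lemma seqA_eq_adj (j : List Int) : pvSeqA j = pvAdj j := by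
  rw [seqA_eq_range]
  induction j with
  | nil => rfl
  | cons a t ih =>
    cases t with
    | nil => rfl
    | cons b t2 =>
      rw [pvAdj]
      rw [← ih]
      simp only [List.length_cons, Nat.add_sub_cancel, List.range_succ_eq_map,
        List.any_cons, List.any_map]
      simp only [List.getD]
      congr 1

lemma noSeqB_eq (j : List Int) : pvNoSeqB j = !pvSeqA j := by
  rw [seqA_eq_adj]
  unfold pvNoSeqB
  rw [PySem.List.slice_from_one]
  congr 1
  induction j with
  | nil => rfl
  | cons a t ih =>
    cases t with
    | nil => rfl
    | cons b t2 =>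
      rw [pvAdj]
      simp only [List.tail_cons, List.zip_cons_cons, List.any_cons] at *
      rw [← ih]

lemma finB_eq (j : List Int) : pvFinB j = !pvFinA j := by
  unfold pvFinB pvFinA
  have hc : j.foldl
      (fun (d : PySem.Dict Int Int) n => d.modify (PySem.Int.mod n 10) 0 (· + 1))
      PySem.Dict.empty
      = PySem.Dict.counter (j.map (fun n => PySem.Int.mod n 10)) := by
    rw [PySem.Dict.counter_eq_foldl, List.foldl_map]
  rw [hc]
  rw [Bool.eq_iff_iff]
  set ends := j.map (fun n => PySem.Int.mod n 10) with hends
  show ((PySem.Dict.counter ends).values.all fun v => decide (v ≤ 4)) = true ↔ _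
  rw [PySem.Dict.values_eq_map_keys _ (PySem.Dict.nodup_keys_counter ends) 0]
  simp only [List.all_eq_true, List.mem_map, PySem.Dict.keys_counter,
    PySem.Dict.getD_counter, Bool.not_eq_true', decide_eq_true_eq]
  constructor
  · intro h
    simp only [List.any_eq_false, decide_eq_false_iff_not, not_lt]
    intro f hf
    have := h _ ⟨f, by simpa [PySem.Set.mem_ofList] using hf, rfl⟩
    simpa [PySem.List.count] using this
  · intro h v hv
    obtain ⟨f, hf, rfl⟩ := hv
    have hf' : f ∈ ends := by simpa [PySem.Set.mem_ofList] using hf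
    have h2 : ¬ (4 < PySem.List.count ends f) := by
      simpa using (List.any_eq_false.mp h) f hf'
    simp only [PySem.List.count] at h2
    push_cast
    omega

lemma parB_eq (j : List Int) (max_p dez_jogo : Int) :
    pvParB j max_p dez_jogo = !pvParRejA j max_p dez_jogo := by
  unfold pvParB pvParRejA
  rw [PySem.List.foldl_if_add_one]
  rw [Bool.eq_iff_iff]
  simp only [List.countP_eq_length_filter, Bool.and_eq_true, Bool.not_eq_true',
    Bool.or_eq_false_iff, decide_eq_true_eq, decide_eq_false_iff_not, not_lt, zero_add]

lemma adj_false_iff (j : List Int) :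
    pvAdj j = false ↔ j.IsChain (fun a b => a + 1 ≠ b) := by
  induction j with
  | nil => simp [pvAdj]
  | cons a t ih =>
    cases t with
    | nil => simp [pvAdj]
    | cons b t2 =>
      rw [pvAdj]
      simp only [Bool.or_eq_false_iff, beq_eq_false_iff_ne, ih, List.isChain_cons_cons]
      constructor
      · rintro ⟨h1, h2⟩; exact ⟨fun he => h1 he.symm, h2⟩
      · rintro ⟨h1, h2⟩; exact ⟨fun he => h1 he.symm, h2⟩

lemma seqA_false_iff (j : List Int) :
    pvSeqA j = false ↔ j.IsChain (fun a b => a + 1 ≠ b) := by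
  rw [seqA_eq_adj, adj_false_iff]

lemma finA_false_iff (j : List Int) :
    pvFinA j = false ↔ ∀ n ∈ j,
      j.countP (fun m => m % 10 == n % 10) ≤ 4 := by
  simp only [← cnt10]
  unfold pvFinA
  rw [List.any_eq_false]
  have hcnt : ∀ n : Int, PySem.List.count (j.map (fun m => PySem.Int.mod m 10)) (PySem.Int.mod n 10)
      = (j.filter (fun m => PySem.Int.mod m 10 == PySem.Int.mod n 10)).length := by
    intro n
    simp [PySem.List.count, List.count_eq_countP, List.countP_eq_length_filter,
      List.filter_map]
    rfl
  constructor
  · intro h n hn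
    have := h _ (List.mem_map.mpr ⟨n, hn, rfl⟩)
    simp only [decide_eq_true_eq, not_lt, hcnt] at this
    exact this
  · intro h f hf
    obtain ⟨n, hn, rfl⟩ := List.mem_map.mp hf
    simp only [decide_eq_true_eq, not_lt, hcnt]
    exact h n hn

lemma livre_iff (f_seq f_fin f_par : Bool) (max_p dez_jogo : Int) (j : List Int) :
    pvKeepA f_seq f_fin f_par max_p dez_jogo j = true ↔
      pvLivre f_seq f_fin f_par max_p dez_jogo j := by
  unfold pvKeepA pvLivre
  simp only [Bool.and_eq_true, Bool.not_eq_true', Bool.and_eq_false_iff]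
  constructor
  · rintro ⟨⟨h1, h2⟩, h3⟩
    refine ⟨?_, ?_, ?_⟩
    · intro hs
      rcases h1 with h | h
      · simp [hs] at h
      · exact (seqA_false_iff j).mp h
    · intro hf
      rcases h2 with h | h
      · simp [hf] at h
      · exact (finA_false_iff j).mp h
    · intro hp
      rcases h3 with h | h
      · simp [hp] at h
      · unfold pvParRejA at h
        simp only [Bool.or_eq_false_iff, decide_eq_false_iff_not, not_lt, cnt2] at h
        omega
  · rintro ⟨h1, h2, h3⟩
    refine ⟨⟨?_, ?_⟩, ?_⟩
    · cases hs : f_seq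
      · exact Or.inl rfl
      · exact Or.inr ((seqA_false_iff j).mpr (h1 hs))
    · cases hf : f_fin
      · exact Or.inl rfl
      · exact Or.inr ((finA_false_iff j).mpr (h2 hf))
    · cases hp : f_par
      · exact Or.inl rfl
      · refine Or.inr ?_
        unfold pvParRejA
        simp only [Bool.or_eq_false_iff, decide_eq_false_iff_not, not_lt, cnt2]
        have := h3 hp
        omega

lemma alt_eq (combos : List (List Int)) (f_seq f_fin f_par : Bool)
    (max_p dez_jogo limite : Int) (tudo : Bool) :
    aplicar_filtros_alt combos f_seq f_fin f_par max_p dez_jogo limite tudo =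
      (if tudo then combos.filter (pvKeepA f_seq f_fin f_par max_p dez_jogo)
       else if limite > 0 then
         PySem.List.slice (combos.filter (pvKeepA f_seq f_fin f_par max_p dez_jogo)) none (some limite)
       else []) := by
  have hs3 : (let s0 := combos.map (fun c => c)
      let s1 := if f_seq then s0.filter pvNoSeqB else s0
      let s2 := if f_fin then s1.filter pvFinB else s1
      if f_par then s2.filter (fun j => pvParB j max_p dez_jogo) else s2)
      = combos.filter (pvKeepA f_seq f_fin f_par max_p dez_jogo) := by
    simp only [List.map_id']
    have hk : pvKeepA f_seq f_fin f_par max_p dez_jogo = fun j =>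
        (!f_seq || pvNoSeqB j) && ((!f_fin || pvFinB j) && (!f_par || pvParB j max_p dez_jogo)) := by
      funext j
      cases f_seq <;> cases f_fin <;> cases f_par <;>
        simp [pvKeepA, noSeqB_eq, finB_eq, parB_eq, Bool.and_assoc]
    rw [hk]
    cases f_seq <;> cases f_fin <;> cases f_par <;>
      simp [List.filter_filter] <;>
      (first
        | rfl
        | (apply List.filter_congr <;> intro x _ <;>
            cases pvNoSeqB x <;> cases pvFinB x <;> cases pvParB x max_p dez_jogo <;> rfl))
  unfold aplicar_filtros_alt
  simp only at hs3 ⊢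
  rw [hs3]

lemma keepA_false₁ {f_seq f_fin f_par : Bool} {max_p dez_jogo : Int} {c : List Int}
    (h : (f_seq && pvSeqA c) = true) : pvKeepA f_seq f_fin f_par max_p dez_jogo c = false := by
  simp [pvKeepA, h]

lemma keepA_false₂ {f_seq f_fin f_par : Bool} {max_p dez_jogo : Int} {c : List Int}
    (h : (f_fin && pvFinA c) = true) : pvKeepA f_seq f_fin f_par max_p dez_jogo c = false := by
  simp [pvKeepA, h]

lemma keepA_false₃ {f_seq f_fin f_par : Bool} {max_p dez_jogo : Int} {c : List Int}
    (h : (f_par && pvParRejA c max_p dez_jogo) = true) :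
    pvKeepA f_seq f_fin f_par max_p dez_jogo c = false := by
  simp [pvKeepA, h]

lemma keepA_true {f_seq f_fin f_par : Bool} {max_p dez_jogo : Int} {c : List Int}
    (h1 : ¬ (f_seq && pvSeqA c) = true) (h2 : ¬ (f_fin && pvFinA c) = true)
    (h3 : ¬ (f_par && pvParRejA c max_p dez_jogo) = true) :
    pvKeepA f_seq f_fin f_par max_p dez_jogo c = true := by
  simp only [Bool.not_eq_true] at h1 h2 h3
  simp [pvKeepA, h1, h2, h3]

lemma go_tudo (f_seq f_fin f_par : Bool) (max_p dez_jogo limite : Int)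
    (l : List (List Int)) : ∀ res : List (List Int),
    aplicarA_go f_seq f_fin f_par max_p dez_jogo limite true l res =
      res ++ l.filter (pvKeepA f_seq f_fin f_par max_p dez_jogo) := by
  induction l with
  | nil => intro res; simp [aplicarA_go]
  | cons c rest ih =>
    intro res
    rw [aplicarA_go]
    by_cases h1 : (f_seq && pvSeqA c) = true
    · simp [h1, ih, List.filter_cons, keepA_false₁ h1]
    · by_cases h2 : (f_fin && pvFinA c) = true
      · simp [h1, h2, ih, List.filter_cons, keepA_false₂ h2]
      · by_cases h3 : (f_par && pvParRejA c max_p dez_jogo) = true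
        · simp [h1, h2, h3, ih, List.filter_cons, keepA_false₃ h3]
        · simp [h1, h2, h3, ih, List.filter_cons, keepA_true h1 h2 h3]

lemma go_take (f_seq f_fin f_par : Bool) (max_p dez_jogo limite : Int)
    (l : List (List Int)) :
    ∀ res : List (List Int), (res.length : Int) < limite →
    aplicarA_go f_seq f_fin f_par max_p dez_jogo limite false l res =
      res ++ (l.filter (pvKeepA f_seq f_fin f_par max_p dez_jogo)).take
        (limite - res.length).toNat := by
  induction l with
  | nil => intro res _; simp [aplicarA_go]
  | cons c rest ih =>
    intro res hres
    rw [aplicarA_go]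
    by_cases h1 : (f_seq && pvSeqA c) = true
    · simp [h1, ih res hres, List.filter_cons, keepA_false₁ h1]
    · by_cases h2 : (f_fin && pvFinA c) = true
      · simp [h1, h2, ih res hres, List.filter_cons, keepA_false₂ h2]
      · by_cases h3 : (f_par && pvParRejA c max_p dez_jogo) = true
        · simp [h1, h2, h3, ih res hres, List.filter_cons, keepA_false₃ h3]
        · simp only [h1, h2, h3, if_false, List.filter_cons, keepA_true h1 h2 h3, if_true,
            Bool.not_false, Bool.true_and]
          by_cases hl : limite ≤ ((res ++ [c]).length : Int)
          · have h1' : (limite - res.length).toNat = 1 := by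
              simp at hl; omega
            rw [decide_eq_true hl]
            simp [h1']
          · have hres' : (((res ++ [c]).length : Int)) < limite := by
              simp at hl ⊢; omega
            have h2' : (limite - res.length).toNat = (limite - (res ++ [c]).length).toNat + 1 := by
              simp; omega
            simp only [hl, decide_false, if_false, ih _ hres', h2', List.take_succ_cons]
            simp

lemma go_low (f_seq f_fin f_par : Bool) (max_p dez_jogo limite : Int)
    (hlim : limite ≤ 0) (l : List (List Int)) :
    ∀ res : List (List Int),
    aplicarA_go f_seq f_fin f_par max_p dez_jogo limite false l res =
      res ++ (l.filter (pvKeepA f_seq f_fin f_par max_p dez_jogo)).take 1 := by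
  induction l with
  | nil => intro res; simp [aplicarA_go]
  | cons c rest ih =>
    intro res
    rw [aplicarA_go]
    by_cases h1 : (f_seq && pvSeqA c) = true
    · simp [h1, ih res, List.filter_cons, keepA_false₁ h1]
    · by_cases h2 : (f_fin && pvFinA c) = true
      · simp [h1, h2, ih res, List.filter_cons, keepA_false₂ h2]
      · by_cases h3 : (f_par && pvParRejA c max_p dez_jogo) = true
        · simp [h1, h2, h3, ih res, List.filter_cons, keepA_false₃ h3]
        · have hl : limite ≤ ((res ++ [c]).length : Int) := by simp; omega
          simp only [h1, h2, h3, if_false, List.filter_cons, keepA_true h1 h2 h3, if_true,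
            Bool.not_false, Bool.true_and]
          rw [decide_eq_true hl]
          simp

lemma unchanged_main (combos : List (List Int)) (f_seq f_fin f_par : Bool)
    (max_p dez_jogo limite : Int) (tudo : Bool)
    (hnd : ¬ D_aplicar_filtros combos f_seq f_fin f_par max_p dez_jogo limite tudo) :
    aplicar_filtros combos f_seq f_fin f_par max_p dez_jogo limite tudo =
      aplicar_filtros_alt combos f_seq f_fin f_par max_p dez_jogo limite tudo := by
  rw [alt_eq]
  unfold aplicar_filtros
  cases tudo with
  | true => simp [go_tudo]
  | false =>
    by_cases hl : 0 < limite
    · rw [go_take _ _ _ _ _ _ _ _ (by simpa using hl)]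
      rw [if_neg (by simp), if_pos hl, PySem.List.slice_to (hb := le_of_lt hl)]
      simp
    · have hlim : limite ≤ 0 := by omega
      have hnone : ∀ j ∈ combos, ¬ pvLivre f_seq f_fin f_par max_p dez_jogo j := by
        intro j hj hliv
        exact hnd ⟨rfl, hlim, j, hj, hliv⟩
      have hfil : combos.filter (pvKeepA f_seq f_fin f_par max_p dez_jogo) = [] := by
        rw [List.filter_eq_nil_iff]
        intro j hj
        simp only [Bool.not_eq_true]
        rcases Bool.eq_false_or_eq_true (pvKeepA f_seq f_fin f_par max_p dez_jogo j) with h | h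
        · exact absurd ((livre_iff _ _ _ _ _ _).mp h) (hnone j hj)
        · exact h
      rw [go_low _ _ _ _ _ _ hlim, hfil]
      simp [hl]

lemma tight_main (combos : List (List Int)) (f_seq f_fin f_par : Bool)
    (max_p dez_jogo limite : Int) (tudo : Bool)
    (hd : D_aplicar_filtros combos f_seq f_fin f_par max_p dez_jogo limite tudo) :
    aplicar_filtros combos f_seq f_fin f_par max_p dez_jogo limite tudo ≠
      aplicar_filtros_alt combos f_seq f_fin f_par max_p dez_jogo limite tudo := by
  obtain ⟨ht, hlim, j, hj, hliv⟩ := hd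
  subst ht
  rw [alt_eq, if_neg (by simp), if_neg (by omega)]
  unfold aplicar_filtros
  rw [go_low _ _ _ _ _ _ hlim]
  have hne : combos.filter (pvKeepA f_seq f_fin f_par max_p dez_jogo) ≠ [] := by
    intro h
    have := List.filter_eq_nil_iff.mp h j hj
    exact this ((livre_iff _ _ _ _ _ _).mpr hliv)
  cases hfe : combos.filter (pvKeepA f_seq f_fin f_par max_p dez_jogo) with
  | nil => exact absurd hfe hne
  | cons a t => simp

-- ===== VERDICT (by name: the statement is the Claim_ definition above) =====
theorem aplicar_filtros_spec : Claim_unchanged_aplicar_filtros := by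
  intro combos f_seq f_fin f_par max_p dez_jogo limite tudo _ hnd
  exact unchanged_main combos f_seq f_fin f_par max_p dez_jogo limite tudo hnd

theorem aplicar_filtros_changed : Claim_changed_aplicar_filtros := by
  unfold Claim_changed_aplicar_filtros; decide

theorem aplicar_filtros_tight : Claim_exact_aplicar_filtros := by
  intro combos f_seq f_fin f_par max_p dez_jogo limite tudo _ hd
  exact tight_main combos f_seq f_fin f_par max_p dez_jogo limite tudo hd
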